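-- pv_equiv track=rewrite | github.com/Doldolee/MORE-CLEAR | dataset/util.py | impute_next_notes_with_background
-- ===== SOURCE A (Python) =====
-- def impute_next_notes_with_background(next_notes, notes, done, missing='no clinical note'):
--
--     imputed = []
--     first_valid = None
--
--     for nxt, cur, is_done in zip(next_notes, notes, done):
--         is_first = False
--         if first_valid is None and nxt != missing:
--             first_valid = f"[background] {nxt}"
--             is_first = True
--
--         if first_valid is not None:
--             if is_first:
--                 imputed_note = first_valid
--             else:
--                 if nxt == missing:
--                     imputed_note = first_valid
--                 else:
--                     imputed_note = f"{first_valid} || {nxt}"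
--         else:
--             imputed_note = nxt
--
--         imputed.append(imputed_note)
--
--         if is_done:
--             first_valid = None
--
--     return imputed
-- ===== SOURCE B (Python) =====
-- def impute_next_notes_with_background(next_notes, notes, done, missing='no clinical note'):
--     # Segment-based reformulation: split the zipped triples into segments that
--     # end at each done=True element, then rewrite each segment around its first
--     # valid next-note.
--     triples = list(zip(next_notes, notes, done))
--     segments = []
--     cur = []
--     for t in triples:
--         cur.append(t)
--         if t[2]:
--             segments.append(cur)
--             cur = []
--     if cur:
--         segments.append(cur)
--
--     out = []
--     for seg in segments:
--         idx = next((i for i, t in enumerate(seg) if t[0] != missing), None)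
--         if idx is None:
--             out.extend(t[0] for t in seg)
--         else:
--             bg = f"[background] {seg[idx][0]}"
--             out.extend(t[0] for t in seg[:idx])
--             out.append(bg)
--             out.extend(bg if t[0] == missing else f"{bg} || {t[0]}" for t in seg[idx+1:])
--     return out
-- ===== Notes on version B (the rewrite author's own statement) =====
-- stated objective: alternative
-- what changed: Replaces A's single stateful loop (Optional first_valid reset on done) with a stateless two-phase pipeline: partition the zipped triples into done-terminated segments, then rewrite each segment around the index of its first valid next-note (raw prefix, background element, suffixed elements).
import Mathlib
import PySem

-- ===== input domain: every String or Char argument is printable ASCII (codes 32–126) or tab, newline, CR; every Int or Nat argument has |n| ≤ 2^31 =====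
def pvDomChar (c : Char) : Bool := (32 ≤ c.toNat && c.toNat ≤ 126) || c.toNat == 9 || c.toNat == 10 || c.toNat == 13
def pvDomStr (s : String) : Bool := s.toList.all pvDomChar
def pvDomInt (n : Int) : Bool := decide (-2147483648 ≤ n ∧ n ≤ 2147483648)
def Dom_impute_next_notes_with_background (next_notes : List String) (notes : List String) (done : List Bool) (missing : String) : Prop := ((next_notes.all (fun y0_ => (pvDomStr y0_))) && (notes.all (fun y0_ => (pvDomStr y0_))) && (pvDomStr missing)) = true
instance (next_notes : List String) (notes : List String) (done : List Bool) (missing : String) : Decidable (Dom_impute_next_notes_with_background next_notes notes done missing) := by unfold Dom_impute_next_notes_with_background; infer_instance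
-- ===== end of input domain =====

-- B replaces A's stateful loop (first_valid reset on done) by a stateless two-phase
-- pipeline (split into done-terminated segments, rewrite each segment around its
-- first valid next-note); same cost, different decomposition.

-- ===== PORT A =====
-- loop body of A (one iteration: first_valid update, emitted note, done-reset)
def pvStepA (missing : String) (st : Option String × List String) (t : String × String × Bool) : Option String × List String :=
  let nxt := t.1
  let is_done := t.2.2
  -- 'if first_valid is None and nxt != missing: first_valid = …; is_first = True'
  let p : Option String × Bool :=
    if st.1 = none ∧ nxt ≠ missing then (some ("[background] " ++ nxt), true) else (st.1, false)
  let imputed_note :=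
    match p.1 with
    | some fv => if p.2 then fv else (if nxt = missing then fv else fv ++ " || " ++ nxt)
    | none => nxt
  ((if is_done then none else p.1), st.2 ++ [imputed_note])

def impute_next_notes_with_background (next_notes : List String) (notes : List String) (done : List Bool) (missing : String) : List String :=
  ((next_notes.zip (notes.zip done)).foldl (pvStepA missing) (none, [])).2

-- ===== PORT B =====
-- one segment: raw prefix before the first valid note, the background element, suffix
def pvProcSeg (missing : String) (seg : List (String × String × Bool)) : List String :=
  match seg.findIdx? (fun t => t.1 != missing) with
  | none => seg.map (fun t => t.1)
  | some idx =>
      let bg := "[background] " ++ (seg.getD idx ("", "", false)).1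
      (seg.take idx).map (fun t => t.1) ++ [bg] ++
        (seg.drop (idx + 1)).map (fun t => if t.1 = missing then bg else bg ++ " || " ++ t.1)

-- loop body of B's splitter: append t to the current segment, close it on done
def pvSegStep (st : List (List (String × String × Bool)) × List (String × String × Bool)) (t : String × String × Bool) : List (List (String × String × Bool)) × List (String × String × Bool) :=
  let cur := st.2 ++ [t]
  if t.2.2 then (st.1 ++ [cur], []) else (st.1, cur)

def impute_next_notes_with_background_alt (next_notes : List String) (notes : List String) (done : List Bool) (missing : String) : List String :=
  let triples := next_notes.zip (notes.zip done)
  let st := triples.foldl pvSegStep ([], [])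
  let segments := if st.2.isEmpty then st.1 else st.1 ++ [st.2]
  segments.foldl (fun out seg => out ++ pvProcSeg missing seg) []

-- ===== PRECONDITION & SPEC =====
def Spec_impute_next_notes_with_background (next_notes : List String) (notes : List String) (done : List Bool) (missing : String) (out : List String) : Prop := out = impute_next_notes_with_background_alt next_notes notes done missing
instance (next_notes : List String) (notes : List String) (done : List Bool) (missing : String) (out : List String) : Decidable (Spec_impute_next_notes_with_background next_notes notes done missing out) := by unfold Spec_impute_next_notes_with_background; infer_instance

-- ===== CLAIM (what is proved, stated in full; the proofs are below) =====
def Claim_equal_impute_next_notes_with_background : Prop := ∀ (next_notes : List String) (notes : List String) (done : List Bool) (missing : String), Dom_impute_next_notes_with_background next_notes notes done missing → Spec_impute_next_notes_with_background next_notes notes done missing (impute_next_notes_with_background next_notes notes done missing)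

-- ===== LEMMAS AND PROOFS =====

-- what A's loop body emits for one element, given its first_valid state
def pvEmit (missing : String) (fv : Option String) (t : String × String × Bool) : String :=
  match fv with
  | none => if t.1 = missing then t.1 else "[background] " ++ t.1
  | some bg => if t.1 = missing then bg else bg ++ " || " ++ t.1

-- A's first_valid transition, ignoring the done-reset
def pvStep (missing : String) (fv : Option String) (t : String × String × Bool) : Option String :=
  match fv with
  | none => if t.1 = missing then none else some ("[background] " ++ t.1)
  | some bg => some bg

-- A's loop, recursive form
def pvGoA (missing : String) (fv : Option String) : List (String × String × Bool) → List String
  | [] => []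
  | t :: rest => pvEmit missing fv t :: pvGoA missing (if t.2.2 then none else pvStep missing fv t) rest

-- A's first_valid state after a partial segment cur
def pvState (missing : String) (cur : List (String × String × Bool)) : Option String :=
  (cur.findIdx? (fun t => t.1 != missing)).map (fun i => "[background] " ++ (cur.getD i ("", "", false)).1)

-- recursive form of B's segment splitter
def pvSegAux : List (String × String × Bool) → List (String × String × Bool) → List (List (String × String × Bool))
  | cur, [] => if cur.isEmpty then [] else [cur]
  | cur, t :: rest => if t.2.2 then (cur ++ [t]) :: pvSegAux [] rest else pvSegAux (cur ++ [t]) rest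

theorem pvL1 (missing : String) (ts : List (String × String × Bool)) :
    ∀ fv acc, (ts.foldl (pvStepA missing) (fv, acc)).2 = acc ++ pvGoA missing fv ts := by
  induction ts with
  | nil => intro fv acc; simp [pvGoA]
  | cons t rest ih =>
      intro fv acc
      rw [List.foldl_cons]
      by_cases hm : t.1 = missing <;> cases fv <;>
        simp [pvStepA, ih, pvGoA, pvEmit, pvStep, hm]

theorem pvL2 (ts : List (String × String × Bool)) :
    ∀ st : List (List (String × String × Bool)) × List (String × String × Bool),
      (if (ts.foldl pvSegStep st).2.isEmpty
       then (ts.foldl pvSegStep st).1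
       else (ts.foldl pvSegStep st).1 ++ [(ts.foldl pvSegStep st).2])
      = st.1 ++ pvSegAux st.2 ts := by
  induction ts with
  | nil =>
      intro st
      rcases st with ⟨segs, cur⟩
      cases cur <;> simp [pvSegAux]
  | cons t rest ih =>
      intro st
      rw [List.foldl_cons, ih]
      by_cases hd : t.2.2 <;> simp [pvSegStep, hd, pvSegAux]

theorem pvL3 (missing : String) (cur : List (String × String × Bool)) (t : String × String × Bool) :
    pvState missing (cur ++ [t]) = pvStep missing (pvState missing cur) t := by
  unfold pvState
  rcases h : cur.findIdx? (fun t => t.1 != missing) with _ | i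
  · by_cases hm : t.1 = missing <;>
      simp [List.findIdx?_append, h, pvStep, hm, List.getD]
  · have hi : i < cur.length := ((List.findIdx?_eq_some_iff_findIdx_eq).mp h).1
    simp [List.findIdx?_append, h, pvStep, List.getD, List.getElem?_append_left hi]

theorem pvL4 (missing : String) (cur : List (String × String × Bool)) (t : String × String × Bool) :
    pvProcSeg missing (cur ++ [t]) = pvProcSeg missing cur ++ [pvEmit missing (pvState missing cur) t] := by
  unfold pvProcSeg pvState
  rcases h : cur.findIdx? (fun t => t.1 != missing) with _ | i
  · by_cases hm : t.1 = missing
    · simp [List.findIdx?_append, h, hm, pvEmit]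
    · simp [List.findIdx?_append, h, hm, pvEmit, List.getD]
  · have hi : i < cur.length := ((List.findIdx?_eq_some_iff_findIdx_eq).mp h).1
    have hi' : i + 1 ≤ cur.length := hi
    simp [List.findIdx?_append, h, pvEmit, List.getD, List.getElem?_append_left hi,
      List.take_append_of_le_length (le_of_lt hi), List.drop_append_of_le_length hi']

theorem pvL5 (missing : String) (ts : List (String × String × Bool)) :
    ∀ cur, (pvSegAux cur ts).flatMap (pvProcSeg missing)
      = pvProcSeg missing cur ++ pvGoA missing (pvState missing cur) ts := by
  induction ts with
  | nil =>
      intro cur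
      cases cur <;> simp [pvSegAux, pvGoA, pvProcSeg]
  | cons t rest ih =>
      intro cur
      by_cases hd : t.2.2
      · have hstate : pvState missing ([] : List (String × String × Bool)) = none := by
          simp [pvState]
        have hseg : pvSegAux cur (t :: rest) = (cur ++ [t]) :: pvSegAux [] rest := by
          simp [pvSegAux, hd]
        have hnil : pvProcSeg missing [] = [] := by simp [pvProcSeg]
        rw [hseg, List.flatMap_cons, pvL4, ih, hstate, hnil]
        simp [pvGoA, hd]
      · have hseg : pvSegAux cur (t :: rest) = pvSegAux (cur ++ [t]) rest := by
          simp [pvSegAux, hd]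
        rw [hseg, ih, pvL4, pvL3]
        simp [pvGoA, hd]

theorem pvAeq (next_notes notes : List String) (done : List Bool) (missing : String) :
    impute_next_notes_with_background next_notes notes done missing
      = pvGoA missing none (next_notes.zip (notes.zip done)) := by
  have h := pvL1 missing (next_notes.zip (notes.zip done)) none []
  simpa [impute_next_notes_with_background] using h

theorem pvBeq (next_notes notes : List String) (done : List Bool) (missing : String) :
    impute_next_notes_with_background_alt next_notes notes done missing
      = (pvSegAux [] (next_notes.zip (notes.zip done))).flatMap (pvProcSeg missing) := by
  simp only [impute_next_notes_with_background_alt]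
  rw [PySem.List.foldl_append_eq_flatMap, List.nil_append, pvL2]
  simp

-- ===== VERDICT (by name: the statement is the Claim_ definition above) =====
theorem impute_next_notes_with_background_spec : Claim_equal_impute_next_notes_with_background := by
  intro next_notes notes done missing _
  unfold Spec_impute_next_notes_with_background
  rw [pvAeq, pvBeq, pvL5 missing _ []]
  simp [pvProcSeg, pvState]
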